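-- pv_equiv track=rewrite | github.com/tranphibaochau/Metabolyze | calculate_fold_change.py | get_unique_comparisons
-- ===== SOURCE A (Python) =====
-- import itertools
--
-- def get_unique_comparisons(group_dict, reverse=True):
--     unique_groups = list(group_dict.keys())
--     unique_comparisons = []
--     for L in range(0, len(unique_groups) + 1):
--         for subset in itertools.combinations(unique_groups, L):
--             if len(subset) == 2:
--                 unique_comparisons.append(subset)
--     # compare both group1 vs. group2 and group2 vs group1`
--     reversed_groups = []
--     for comparison in unique_comparisons:
--         reversed_comparison = tuple(reversed(comparison))
--         reversed_groups.append(reversed_comparison)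
--
--     if (type(reverse) is bool and reverse is True):
--         unique_comparisons = unique_comparisons + reversed_groups
--
--     return unique_comparisons
-- ===== SOURCE B (Python) =====
-- def get_unique_comparisons(group_dict, reverse=True):
--     # one direct pass over the keys instead of enumerating all subset sizes
--     pairs = []
--     rest = list(group_dict.keys())
--     while rest:
--         first = rest.pop(0)
--         for y in rest:
--             pairs.append((first, y))
--     if reverse:
--         return pairs + [(b, a) for (a, b) in pairs]
--     return pairs
-- ===== Notes on version B (the rewrite author's own statement) =====
-- stated objective: faster
-- what changed: B builds the ordered key pairs with one direct quadratic pass (pop the head key, pair it with each remaining key) instead of A's enumeration of all 2^n subsets of every size filtered down to those of length 2; intended as faster (asymptotic, O(2^n) to O(n^2)); a timing run saw A time out at n=64 where B returned.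
import Mathlib
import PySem

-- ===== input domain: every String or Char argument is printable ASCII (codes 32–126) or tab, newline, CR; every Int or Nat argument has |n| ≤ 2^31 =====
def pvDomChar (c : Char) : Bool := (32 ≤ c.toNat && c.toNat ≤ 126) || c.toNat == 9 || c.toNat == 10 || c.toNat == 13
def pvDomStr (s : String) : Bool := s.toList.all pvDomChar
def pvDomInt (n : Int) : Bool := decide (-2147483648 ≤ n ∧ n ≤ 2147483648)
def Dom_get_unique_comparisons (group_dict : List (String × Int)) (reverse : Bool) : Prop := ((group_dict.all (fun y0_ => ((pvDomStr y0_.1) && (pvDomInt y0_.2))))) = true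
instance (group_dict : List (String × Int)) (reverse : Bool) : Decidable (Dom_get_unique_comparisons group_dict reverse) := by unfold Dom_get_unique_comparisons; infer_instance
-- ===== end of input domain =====

-- B builds the pairs in one direct quadratic pass instead of A's enumeration of all
-- subset sizes; faster (A times out already at a few dozen keys where B returns).

-- ===== PORT A =====
-- itertools.combinations(xs, k) in itertools' order (lexicographic by index)
def pyCombinations : Nat → List String → List (List String)
  | 0, _ => [[]]
  | _ + 1, [] => []
  | k + 1, x :: xs => (pyCombinations k xs).map (fun s => x :: s) ++ pyCombinations (k + 1) xs

-- 'unique_comparisons.append(subset)' for a subset known (by the guard) to have length 2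
def pairOfLen2 : List String → List (String × String)
  | [a, b] => [(a, b)]
  | _ => []

def get_unique_comparisons (group_dict : List (String × Int)) (reverse : Bool) : List (String × String) :=
  let unique_groups : List String := PySem.Set.ofList (group_dict.map (·.1))  -- list(group_dict.keys())
  let unique_comparisons : List (String × String) :=
    (PySem.List.pyRange 0 (unique_groups.length + 1) 1).foldl
      (fun acc L =>
        (pyCombinations L.toNat unique_groups).foldl
          (fun acc2 subset => if subset.length == 2 then acc2 ++ pairOfLen2 subset else acc2)
          acc)
      []
  let reversed_groups : List (String × String) := unique_comparisons.map (fun c => (c.2, c.1))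
  if reverse then unique_comparisons ++ reversed_groups else unique_comparisons

-- ===== PORT B =====
-- while rest: first = rest.pop(0); pair first with each remaining key
def pairsB : List String → List (String × String)
  | [] => []
  | first :: rest => rest.map (fun y => (first, y)) ++ pairsB rest

def get_unique_comparisons_alt (group_dict : List (String × Int)) (reverse : Bool) : List (String × String) :=
  let pairs := pairsB (PySem.Set.ofList (group_dict.map (·.1)))
  if reverse then pairs ++ pairs.map (fun p => (p.2, p.1)) else pairs

-- ===== PRECONDITION & SPEC =====
def Spec_get_unique_comparisons (group_dict : List (String × Int)) (reverse : Bool) (out : List (String × String)) : Prop := out = get_unique_comparisons_alt group_dict reverse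
instance (group_dict : List (String × Int)) (reverse : Bool) (out : List (String × String)) : Decidable (Spec_get_unique_comparisons group_dict reverse out) := by unfold Spec_get_unique_comparisons; infer_instance

-- ===== CLAIM (what is proved, stated in full; the proofs are below) =====
def Claim_equal_get_unique_comparisons : Prop := ∀ (group_dict : List (String × Int)) (reverse : Bool), Dom_get_unique_comparisons group_dict reverse → Spec_get_unique_comparisons group_dict reverse (get_unique_comparisons group_dict reverse)

-- ===== LEMMAS AND PROOFS =====

-- a fold whose step fixes every element of the list is the identity
theorem foldl_id_of_mem {α β : Type} (l : List β) (f : α → β → α)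
    (h : ∀ x ∈ l, ∀ a, f a x = a) (acc : α) : l.foldl f acc = acc := by
  induction l generalizing acc with
  | nil => rfl
  | cons x l ih =>
    simp only [List.foldl_cons, h x (by simp)]
    exact ih (fun t ht a => h t (by simp [ht]) a) acc

-- every member of pyCombinations k xs has length k
theorem length_mem_pyCombinations (k : Nat) (xs : List String) :
    ∀ s ∈ pyCombinations k xs, s.length = k := by
  induction k generalizing xs with
  | zero => intro s hs; simp [pyCombinations] at hs; simp [hs]
  | succ k ih =>
    induction xs with
    | nil => intro s hs; simp [pyCombinations] at hs
    | cons x xs ihx =>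
      intro s hs
      simp only [pyCombinations, List.mem_append, List.mem_map] at hs
      rcases hs with ⟨t, ht, rfl⟩ | hs
      · simp [ih xs t ht]
      · exact ihx s hs

-- the inner loop over subsets of size k ≠ 2 leaves the accumulator unchanged
theorem inner_foldl_ne_two (k : Nat) (hk : k ≠ 2) (xs : List String) (acc : List (String × String)) :
    (pyCombinations k xs).foldl
      (fun acc2 subset => if subset.length == 2 then acc2 ++ pairOfLen2 subset else acc2) acc = acc := by
  refine foldl_id_of_mem _ _ (fun s hs a => ?_) acc
  rw [if_neg (by simp [length_mem_pyCombinations k xs s hs, hk])]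

-- combinations of size 1 are the singletons
theorem pyCombinations_one (xs : List String) :
    pyCombinations 1 xs = xs.map (fun y => [y]) := by
  induction xs with
  | nil => rfl
  | cons x xs ih => simp [pyCombinations, ih]

-- combinations of size 2, unfolded one head element
theorem pyCombinations_two_cons (x : String) (xs : List String) :
    pyCombinations 2 (x :: xs) = xs.map (fun y => [x, y]) ++ pyCombinations 2 xs := by
  simp [pyCombinations, pyCombinations_one, List.map_map, Function.comp]

-- the inner loop over subsets of size 2 appends exactly pairsB
theorem inner_foldl_two (xs : List String) (acc : List (String × String)) :
    (pyCombinations 2 xs).foldl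
      (fun acc2 subset => if subset.length == 2 then acc2 ++ pairOfLen2 subset else acc2) acc
    = acc ++ pairsB xs := by
  induction xs generalizing acc with
  | nil => simp [pyCombinations, pairsB]
  | cons x xs ih =>
    rw [pyCombinations_two_cons, List.foldl_append, pairsB]
    have hmap : ∀ (ys : List String) (a : List (String × String)),
        (ys.map (fun y => [x, y])).foldl
          (fun acc2 subset => if subset.length == 2 then acc2 ++ pairOfLen2 subset else acc2) a
        = a ++ ys.map (fun y => (x, y)) := by
      intro ys
      induction ys with
      | nil => intro a; simp
      | cons y ys ihy =>
        intro a
        simp only [List.map_cons, List.foldl_cons]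
        rw [if_pos (by rfl), show pairOfLen2 [x, y] = [(x, y)] from rfl, ihy]
        simp
    rw [hmap, ih, List.append_assoc]

-- the outer loop over a range of values all ≥ 3 leaves the accumulator unchanged
theorem outer_foldl_ge_three (xs : List String) (a b : Int) (ha : 3 ≤ a)
    (acc : List (String × String)) :
    (PySem.List.pyRange a b 1).foldl
      (fun acc L =>
        (pyCombinations L.toNat xs).foldl
          (fun acc2 subset => if subset.length == 2 then acc2 ++ pairOfLen2 subset else acc2) acc)
      acc = acc := by
  refine foldl_id_of_mem _ _ (fun L hL acc' => ?_) acc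
  have h3 : 3 ≤ L := by have := (PySem.List.mem_pyRange_one).mp hL; omega
  exact inner_foldl_ne_two L.toNat (by omega) xs acc'

-- the whole accumulation of A equals pairsB
theorem accum_eq_pairsB (xs : List String) :
    (PySem.List.pyRange 0 (xs.length + 1) 1).foldl
      (fun acc L =>
        (pyCombinations L.toNat xs).foldl
          (fun acc2 subset => if subset.length == 2 then acc2 ++ pairOfLen2 subset else acc2) acc)
      [] = pairsB xs := by
  match xs with
  | [] =>
    rw [show PySem.List.pyRange 0 (([] : List String).length + 1) 1 = [0] from by decide]
    simp only [List.foldl_cons, List.foldl_nil]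
    rw [show Int.toNat 0 = 0 from rfl, inner_foldl_ne_two 0 (by omega)]
    rfl
  | [x] =>
    rw [show (([x] : List String).length : Int) + 1 = 2 from by simp,
        show PySem.List.pyRange 0 2 1 = [0, 1] from by decide]
    simp only [List.foldl_cons, List.foldl_nil]
    rw [show Int.toNat 0 = 0 from rfl, show Int.toNat 1 = 1 from rfl,
        inner_foldl_ne_two 0 (by omega), inner_foldl_ne_two 1 (by omega)]
    rfl
  | x :: y :: rest =>
    have hlen : ((x :: y :: rest).length : Int) + 1 = 3 + (rest.length : Int) := by
      simp; omega
    rw [hlen, PySem.List.pyRange_one_append 0 3 (3 + (rest.length : Int)) (by omega) (by omega),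
        List.foldl_append,
        show PySem.List.pyRange 0 3 1 = [0, 1, 2] from by decide]
    simp only [List.foldl_cons, List.foldl_nil]
    rw [show Int.toNat 0 = 0 from rfl, show Int.toNat 1 = 1 from rfl,
        show Int.toNat 2 = 2 from rfl,
        inner_foldl_ne_two 0 (by omega), inner_foldl_ne_two 1 (by omega),
        inner_foldl_two, List.nil_append,
        outer_foldl_ge_three _ 3 _ (by omega)]

-- ===== VERDICT (by name: the statement is the Claim_ definition above) =====
theorem get_unique_comparisons_spec : Claim_equal_get_unique_comparisons := by
  intro group_dict reverse _
  unfold Spec_get_unique_comparisons get_unique_comparisons get_unique_comparisons_alt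
  simp only [accum_eq_pairsB]
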